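-- pv_equiv track=rewrite | github.com/kctamjustcode/algo_misc | bktrk.py | bk
-- ===== SOURCE A (Python) =====
-- def bk(i, bktp):
--     if i == len(bktp)-1:
--         return True
--     else:
--         if i == bktp[i]:
--             return bk(i+1, bktp)
--         else:
--             return False
-- ===== SOURCE B (Python) =====
-- def bk(i, bktp):
--     return all(bktp[k] == k for k in range(i, len(bktp) - 1))
-- ===== Notes on version B (the rewrite author's own statement) =====
-- stated objective: simpler
-- what changed: Replaced the step-by-step tail recursion by a single all() over range(i, len(bktp)-1); Pre_ excludes only the inputs on which A raises IndexError (a start index beyond len(bktp)-1, or below -len(bktp)).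
import Mathlib
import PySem

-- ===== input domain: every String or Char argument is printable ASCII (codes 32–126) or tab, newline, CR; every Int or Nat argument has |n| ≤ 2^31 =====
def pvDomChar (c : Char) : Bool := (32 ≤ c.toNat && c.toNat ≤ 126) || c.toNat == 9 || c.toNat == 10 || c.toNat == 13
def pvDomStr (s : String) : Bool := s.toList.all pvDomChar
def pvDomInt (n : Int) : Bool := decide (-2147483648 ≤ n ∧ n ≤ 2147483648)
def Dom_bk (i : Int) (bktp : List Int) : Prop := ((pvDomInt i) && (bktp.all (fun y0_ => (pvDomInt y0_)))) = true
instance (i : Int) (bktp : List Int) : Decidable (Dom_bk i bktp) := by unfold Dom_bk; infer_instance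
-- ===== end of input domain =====

-- B replaces A's tail recursion by a single all() over range(i, len-1); same cost, simpler decomposition.

-- ===== PORT A =====
def bk (i : Int) (bktp : List Int) : Bool :=
  if i = (bktp.length : Int) - 1 then true
  else
    match h : PySem.List.pyGet? bktp i with
    | none => false               -- Python raises IndexError here (outside Pre_)
    | some v => if i = v then bk (i + 1) bktp else false
termination_by ((bktp.length : Int) - 1 - i).toNat
decreasing_by
  have hin : -(bktp.length : Int) ≤ i ∧ i < (bktp.length : Int) := by
    by_contra hc
    have : PySem.List.pyGet? bktp i = none := by
      rw [PySem.List.pyGet?_eq_none_iff]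
      simpa [PySem.Raise.InRange] using hc
    simp [this] at h
  omega

-- ===== PORT B =====
def bk_alt (i : Int) (bktp : List Int) : Bool :=
  (PySem.List.pyRange i ((bktp.length : Int) - 1) 1).all
    (fun k => PySem.List.pyGet? bktp k == some k)

-- ===== PRECONDITION & SPEC =====
-- Pre_ excludes exactly the inputs on which A raises IndexError: a start index i
-- outside Python's valid index range [-len, len) and different from len(bktp)-1.
def Pre_bk (i : Int) (bktp : List Int) : Prop :=
  i = (bktp.length : Int) - 1 ∨ (-(bktp.length : Int) ≤ i ∧ i < (bktp.length : Int) - 1)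
instance (i : Int) (bktp : List Int) : Decidable (Pre_bk i bktp) := by unfold Pre_bk; infer_instance
def pvWitness_bk : Int × List Int := (0, [0, 1, 5])

def Spec_bk (i : Int) (bktp : List Int) (out : Bool) : Prop := out = bk_alt i bktp
instance (i : Int) (bktp : List Int) (out : Bool) : Decidable (Spec_bk i bktp out) := by unfold Spec_bk; infer_instance

-- ===== CLAIM (what is proved, stated in full; the proofs are below) =====
def Claim_equal_bk : Prop := ∀ (i : Int) (bktp : List Int), Dom_bk i bktp → Pre_bk i bktp → Spec_bk i bktp (bk i bktp)

-- ===== LEMMAS AND PROOFS =====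

theorem bk_alt_last (bktp : List Int) : bk_alt ((bktp.length : Int) - 1) bktp = true := by
  simp [bk_alt, PySem.List.pyRange_one_eq_nil (le_refl _)]

-- one unrolling of bk_alt matching one recursive step of bk
theorem bk_alt_step (bktp : List Int) (i : Int) (h : i < (bktp.length : Int) - 1) :
    bk_alt i bktp = ((PySem.List.pyGet? bktp i == some i) && bk_alt (i + 1) bktp) := by
  unfold bk_alt
  rw [PySem.List.pyRange_one_cons h]
  simp

theorem bk_agree (m : Nat) (i : Int) (bktp : List Int)
    (hm : (((bktp.length : Int) - 1 - i)).toNat = m) (hp : Pre_bk i bktp) :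
    bk i bktp = bk_alt i bktp := by
  induction m using Nat.strong_induction_on generalizing i with
  | _ m ih =>
    rcases hp with he | ⟨hl, hr⟩
    · rw [he, bk_alt_last, bk, if_pos rfl]
    · rw [bk, if_neg (by omega), bk_alt_step bktp i hr]
      have hsome : ∃ v, PySem.List.pyGet? bktp i = some v := by
        cases hg : PySem.List.pyGet? bktp i with
        | none =>
          rw [PySem.List.pyGet?_eq_none_iff] at hg
          exact absurd (by simp [PySem.Raise.InRange]; omega) hg
        | some v => exact ⟨v, rfl⟩
      obtain ⟨v, hv⟩ := hsome
      rw [hv]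
      by_cases hiv : i = v
      · subst hiv
        have := ih (((bktp.length : Int) - 1 - (i+1))).toNat (by omega) (i+1) rfl
          (by unfold Pre_bk; omega)
        simp [this]
      · simp [hiv, Ne.symm hiv]

-- ===== VERDICT (by name: the statement is the Claim_ definition above) =====
theorem bk_spec : Claim_equal_bk := by
  intro i bktp _ hp
  exact bk_agree _ i bktp rfl hp
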